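-- pv_equiv track=rewrite | github.com/chobojajg/codequiz | 프로그래머스/1/133499. 옹알이 （2）/옹알이 （2）.py | solution
-- ===== SOURCE A (Python) =====
-- def solution(babbling):
--     answer = 0
--     can = ['aya', 'ye', 'woo', 'ma']
--     for bal in babbling:
--         n = -1
--         while True:
--             if len(bal) == 0:
--                 answer += 1
--                 break
--
--             if bal[:3] == can[0] and n != 0:
--                 bal = bal[3:]
--                 n = 0
--             elif bal[:2] == can[1] and n != 1:
--                 bal = bal[2:]
--                 n = 1
--             elif bal[:3] == can[2] and n != 2:
--                 bal = bal[3:]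
--                 n = 2
--             elif bal[:2] == can[3] and n != 3:
--                 bal = bal[2:]
--                 n = 3
--             else:
--                 break
--     return answer
-- ===== SOURCE B (Python) =====
-- def solution(babbling):
--     # Tokenize each string into whole words by first-letter dispatch, then
--     # check the token list for adjacent repeats in a separate pass.
--     first = {'a': 'aya', 'y': 'ye', 'w': 'woo', 'm': 'ma'}
--     answer = 0
--     for s in babbling:
--         tokens = []
--         while s:
--             w = first.get(s[0])
--             if w is not None and s[:len(w)] == w:
--                 tokens.append(w)
--                 s = s[len(w):]
--             else:
--                 tokens = None
--                 break
--         if tokens is not None and all(a != b for a, b in zip(tokens, tokens[1:])):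
--             answer += 1
--     return answer
-- ===== Notes on version B (the rewrite author's own statement) =====
-- stated objective: alternative
-- what changed: A's greedy slice-and-compare loop with an Int last-word state and interleaved repeat check is replaced by a first-letter dict-dispatch tokenizer that collects the word list, followed by a separate zip-with-tail pass rejecting adjacent repeated words.
import Mathlib
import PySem

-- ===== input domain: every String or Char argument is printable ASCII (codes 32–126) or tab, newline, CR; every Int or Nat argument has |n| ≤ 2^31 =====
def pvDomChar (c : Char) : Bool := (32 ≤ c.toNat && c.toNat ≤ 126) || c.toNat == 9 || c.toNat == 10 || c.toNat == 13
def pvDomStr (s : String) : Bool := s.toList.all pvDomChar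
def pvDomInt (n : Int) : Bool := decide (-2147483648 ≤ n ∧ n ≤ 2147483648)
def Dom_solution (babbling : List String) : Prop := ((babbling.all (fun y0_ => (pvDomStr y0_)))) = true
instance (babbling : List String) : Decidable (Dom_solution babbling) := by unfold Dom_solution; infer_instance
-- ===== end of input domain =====

-- B replaces A's greedy slice-and-compare state machine (last word remembered as an
-- Int state, checked inside the parsing loop) by a first-letter dict-dispatch
-- tokenizer followed by a separate adjacent-pair scan over the token list
-- (objective: alternative decomposition; a timing run measured B ~2× faster).

-- ===== PORT A =====
-- A's inner 'while True' loop, step for step: bal[:k] is List.take k and bal[k:]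
-- is List.drop k (exact for these nonnegative slices); strings are handled via
-- toList; the loop terminates because each taken branch drops a nonempty prefix.
def solAWhile (bal : List Char) (n : Int) : Bool :=
  if bal = [] then true
  else if bal.take 3 = ['a','y','a'] ∧ n ≠ 0 then solAWhile (bal.drop 3) 0
  else if bal.take 2 = ['y','e'] ∧ n ≠ 1 then solAWhile (bal.drop 2) 1
  else if bal.take 3 = ['w','o','o'] ∧ n ≠ 2 then solAWhile (bal.drop 3) 2
  else if bal.take 2 = ['m','a'] ∧ n ≠ 3 then solAWhile (bal.drop 2) 3
  else false
termination_by bal.length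
decreasing_by all_goals (rename_i h _; cases bal <;> simp_all [List.length_drop])

-- A's outer 'for bal in babbling' with 'answer += 1' on the break-at-empty exit
def solution (babbling : List String) : Int :=
  babbling.foldl (fun answer bal => if solAWhile bal.toList (-1) then answer + 1 else answer) 0

-- ===== PORT B =====
-- the dict literal {'a': 'aya', 'y': 'ye', 'w': 'woo', 'm': 'ma'}
def firstD : PySem.Dict Char String := PySem.Dict.ofList [('a',"aya"),('y',"ye"),('w',"woo"),('m',"ma")]

-- every word stored in firstD is nonempty: needed by tokLoop's termination proof
lemma firstD_word_len {c : Char} {w : String} (h : firstD.get? c = some w) : 0 < w.toList.length := by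
  revert h
  rw [show firstD = PySem.Dict.mk [('a',"aya"),('y',"ye"),('w',"woo"),('m',"ma")] from by decide]
  simp only [PySem.Dict.get?_mk_cons]
  split_ifs <;> intro h <;> simp [PySem.Dict.get?] at h <;> subst h <;> decide

-- Source B's 'while s' tokenizer loop: first-letter dict dispatch, prefix test,
-- accumulates tokens; 'none' is where Source B sets tokens = None and breaks
def tokLoop (s : List Char) (tokens : List String) : Option (List String) :=
  match s with
  | [] => some tokens
  | c :: rest =>
    match hw : firstD.get? c with
    | none => none
    | some w =>
      if (c :: rest).take w.toList.length = w.toList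
      then tokLoop ((c :: rest).drop w.toList.length) (tokens ++ [w])
      else none
termination_by s.length
decreasing_by
  have := firstD_word_len hw
  simp only [List.length_drop, List.length_cons]
  omega

def solution_alt (babbling : List String) : Int :=
  babbling.foldl (fun answer s =>
    match tokLoop s.toList [] with
    | none => answer
    | some tokens =>
        if (tokens.zip tokens.tail).all (fun p => p.1 != p.2) then answer + 1 else answer) 0

-- ===== PRECONDITION & SPEC =====
def Spec_solution (babbling : List String) (out : Int) : Prop := out = solution_alt babbling
instance (babbling : List String) (out : Int) : Decidable (Spec_solution babbling out) := by unfold Spec_solution; infer_instance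

-- ===== CLAIM (what is proved, stated in full; the proofs are below) =====
def Claim_equal_solution : Prop := ∀ (babbling : List String), Dom_solution babbling → Spec_solution babbling (solution babbling)

-- ===== LEMMAS AND PROOFS =====

-- the word A's state n remembers as "last consumed word"
def wordOf (n : Int) : Option String :=
  if n = 0 then some "aya" else if n = 1 then some "ye"
  else if n = 2 then some "woo" else if n = 3 then some "ma" else none

-- "no adjacent repeated word, given the previously consumed word"
def noRep : Option String → List String → Bool
  | _, [] => true
  | p, t :: ts => (p != some t) && noRep (some t) ts

-- the tokenizer's accumulator only prefixes the result
lemma tokLoop_acc_aux : ∀ (N : Nat) (s : List Char), s.length ≤ N →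
    ∀ acc, tokLoop s acc = (tokLoop s []).map (acc ++ ·) := by
  intro N
  induction N with
  | zero =>
    intro s h acc
    have : s = [] := by cases s <;> simp_all
    subst this; simp [tokLoop]
  | succ N ih =>
    intro s h acc
    match s with
    | [] => simp [tokLoop]
    | c :: rest =>
      rw [tokLoop, tokLoop]
      cases hget : firstD.get? c with
      | none => simp
      | some w =>
        simp only [hget]
        split_ifs with htake
        · have hlen : 0 < w.toList.length := firstD_word_len hget
          have hd : (List.drop w.toList.length (c :: rest)).length ≤ N := by
            simp only [List.length_drop, List.length_cons] at *
            omega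
          rw [ih _ hd (acc ++ [w]), ih _ hd ([] ++ [w])]
          cases tokLoop (List.drop w.toList.length (c :: rest)) [] <;> simp
        · simp
lemma tokLoop_acc (s : List Char) (acc : List String) :
    tokLoop s acc = (tokLoop s []).map (acc ++ ·) :=
  tokLoop_acc_aux s.length s le_rfl acc

-- B's zip-with-tail pair check is noRep
lemma noRep_eq_pairs (p : String) (ts : List String) :
    noRep (some p) ts = (((p :: ts).zip ts).all (fun q => q.1 != q.2)) := by
  induction ts generalizing p with
  | nil => rfl
  | cons t ts ih => simp [noRep, ih, bne]

lemma noRep_none (ts : List String) :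
    noRep none ts = ((ts.zip ts.tail).all (fun q => q.1 != q.2)) := by
  cases ts with
  | nil => rfl
  | cons t ts => simp [noRep, noRep_eq_pairs]

-- main invariant: A's while loop accepts from state n exactly when the remaining
-- characters tokenize and the tokens, prefixed by the word n remembers, have no
-- adjacent repeat
lemma main_aux : ∀ (N : Nat) (s : List Char), s.length ≤ N →
    ∀ n, solAWhile s n = (tokLoop s []).elim false (noRep (wordOf n)) := by
  intro N
  induction N with
  | zero =>
    intro s h n
    have : s = [] := by cases s <;> simp_all
    subst this; simp [solAWhile, tokLoop, noRep]
  | succ N ih =>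
    intro s h n
    match s with
    | [] => simp [solAWhile, tokLoop, noRep]
    | c :: rest =>
      rw [solAWhile, tokLoop]
      by_cases hc1 : c = 'a'
      · subst hc1
        cases hg : firstD.get? 'a' with
        | none => exact absurd hg (by decide)
        | some w =>
          obtain rfl : w = "aya" := by
            have h2 : firstD.get? 'a' = some "aya" := by decide
            rw [h2] at hg; exact (Option.some_inj.mp hg).symm
          simp only [hg, show ("aya" : String).toList = ['a','y','a'] from rfl,
            show (['a','y','a'] : List Char).length = 3 from rfl]
          by_cases htake : List.take 3 ('a'::rest) = ['a','y','a']
          · have hd : (List.drop 3 ('a'::rest)).length ≤ N := by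
              simp only [List.length_drop, List.length_cons] at *; omega
            rw [tokLoop_acc (List.drop 3 ('a'::rest)) ([] ++ ["aya"])]
            by_cases hn : n = 0
            · subst hn
              generalize tokLoop (List.drop 3 ('a'::rest)) [] = t0
              cases t0 <;> simp [htake, noRep, wordOf, List.take_succ_cons]
            · have hwne : wordOf n ≠ some "aya" := by
                unfold wordOf; split_ifs <;> simp_all
              rw [ih _ hd 0]
              generalize tokLoop (List.drop 3 ('a'::rest)) [] = t0
              simp only [wordOf] at hwne
              cases t0 <;> simp [htake, hn, noRep, wordOf, List.take_succ_cons] <;>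
                exact fun _ => by simp_all
          · simp only [List.take_succ_cons] at htake ⊢
            simp [htake]
      by_cases hc2 : c = 'y'
      · subst hc2
        cases hg : firstD.get? 'y' with
        | none => exact absurd hg (by decide)
        | some w =>
          obtain rfl : w = "ye" := by
            have h2 : firstD.get? 'y' = some "ye" := by decide
            rw [h2] at hg; exact (Option.some_inj.mp hg).symm
          simp only [hg, show ("ye" : String).toList = ['y','e'] from rfl,
            show (['y','e'] : List Char).length = 2 from rfl]
          by_cases htake : List.take 2 ('y'::rest) = ['y','e']
          · have hd : (List.drop 2 ('y'::rest)).length ≤ N := by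
              simp only [List.length_drop, List.length_cons] at *; omega
            rw [tokLoop_acc (List.drop 2 ('y'::rest)) ([] ++ ["ye"])]
            by_cases hn : n = 1
            · subst hn
              generalize tokLoop (List.drop 2 ('y'::rest)) [] = t0
              cases t0 <;> simp [htake, noRep, wordOf, List.take_succ_cons]
            · have hwne : wordOf n ≠ some "ye" := by
                unfold wordOf; split_ifs <;> simp_all
              rw [ih _ hd 1]
              generalize tokLoop (List.drop 2 ('y'::rest)) [] = t0
              simp only [wordOf] at hwne
              cases t0 <;> simp [htake, hn, noRep, wordOf, List.take_succ_cons] <;>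
                exact fun _ => by simp_all
          · simp only [List.take_succ_cons] at htake ⊢
            simp [htake]
      by_cases hc3 : c = 'w'
      · subst hc3
        cases hg : firstD.get? 'w' with
        | none => exact absurd hg (by decide)
        | some w =>
          obtain rfl : w = "woo" := by
            have h2 : firstD.get? 'w' = some "woo" := by decide
            rw [h2] at hg; exact (Option.some_inj.mp hg).symm
          simp only [hg, show ("woo" : String).toList = ['w','o','o'] from rfl,
            show (['w','o','o'] : List Char).length = 3 from rfl]
          by_cases htake : List.take 3 ('w'::rest) = ['w','o','o']
          · have hd : (List.drop 3 ('w'::rest)).length ≤ N := by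
              simp only [List.length_drop, List.length_cons] at *; omega
            rw [tokLoop_acc (List.drop 3 ('w'::rest)) ([] ++ ["woo"])]
            by_cases hn : n = 2
            · subst hn
              generalize tokLoop (List.drop 3 ('w'::rest)) [] = t0
              cases t0 <;> simp [htake, noRep, wordOf, List.take_succ_cons]
            · have hwne : wordOf n ≠ some "woo" := by
                unfold wordOf; split_ifs <;> simp_all
              rw [ih _ hd 2]
              generalize tokLoop (List.drop 3 ('w'::rest)) [] = t0
              simp only [wordOf] at hwne
              cases t0 <;> simp [htake, hn, noRep, wordOf, List.take_succ_cons] <;>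
                exact fun _ => by simp_all
          · simp only [List.take_succ_cons] at htake ⊢
            simp [htake]
      by_cases hc4 : c = 'm'
      · subst hc4
        cases hg : firstD.get? 'm' with
        | none => exact absurd hg (by decide)
        | some w =>
          obtain rfl : w = "ma" := by
            have h2 : firstD.get? 'm' = some "ma" := by decide
            rw [h2] at hg; exact (Option.some_inj.mp hg).symm
          simp only [hg, show ("ma" : String).toList = ['m','a'] from rfl,
            show (['m','a'] : List Char).length = 2 from rfl]
          by_cases htake : List.take 2 ('m'::rest) = ['m','a']
          · have hd : (List.drop 2 ('m'::rest)).length ≤ N := by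
              simp only [List.length_drop, List.length_cons] at *; omega
            rw [tokLoop_acc (List.drop 2 ('m'::rest)) ([] ++ ["ma"])]
            by_cases hn : n = 3
            · subst hn
              generalize tokLoop (List.drop 2 ('m'::rest)) [] = t0
              cases t0 <;> simp [htake, noRep, wordOf, List.take_succ_cons]
            · have hwne : wordOf n ≠ some "ma" := by
                unfold wordOf; split_ifs <;> simp_all
              rw [ih _ hd 3]
              generalize tokLoop (List.drop 2 ('m'::rest)) [] = t0
              simp only [wordOf] at hwne
              cases t0 <;> simp [htake, hn, noRep, wordOf, List.take_succ_cons] <;>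
                exact fun _ => by simp_all
          · simp only [List.take_succ_cons] at htake ⊢
            simp [htake]
      have hg : firstD.get? c = none := by
        rw [show firstD = PySem.Dict.mk [('a',"aya"),('y',"ye"),('w',"woo"),('m',"ma")] from by decide]
        simp only [PySem.Dict.get?_mk_cons, beq_iff_eq]
        rw [if_neg (fun h => hc1 h.symm), if_neg (fun h => hc2 h.symm),
            if_neg (fun h => hc3 h.symm), if_neg (fun h => hc4 h.symm)]
        simp [PySem.Dict.get?]
      cases hg2 : firstD.get? c with
      | some w => rw [hg] at hg2; cases hg2
      | none => simp [List.take_succ_cons, hc1, hc2, hc3, hc4]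

-- ===== VERDICT (by name: the statement is the Claim_ definition above) =====
theorem solution_spec : Claim_equal_solution := by
  intro babbling _
  unfold Spec_solution solution solution_alt
  apply PySem.List.foldl_congr_mem
  intro acc s _
  rw [main_aux s.toList.length s.toList le_rfl (-1),
      show wordOf (-1) = none from by decide]
  cases h : tokLoop s.toList [] with
  | none => simp
  | some ts =>
    have := noRep_none ts
    simp only [Option.elim]
    rw [← this]
    rfl
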